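-- pv_equiv track=rewrite | github.com/BuiXuanSon1412/vrpbtw | ga/moo_algorithm/agea.bk.py | calculate_crowding_degree
-- ===== SOURCE A (Python) =====
-- def calculate_crowding_degree(grid_indices):
--     """Calculate crowding degree for each solution (Eq. 12, 13)"""
--     crowding = []
--     M = len(grid_indices[0]) if grid_indices else 0
--
--     for i, idx_i in enumerate(grid_indices):
--         neighbor_count = 0
--         for j, idx_j in enumerate(grid_indices):
--             if i == j:
--                 continue
--             # Check if neighbor (Chebyshev distance = 1)
--             max_diff = max(abs(idx_i[k] - idx_j[k]) for k in range(M))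
--             if max_diff == 1:
--                 neighbor_count += 1
--         crowding.append(neighbor_count)
--
--     return crowding
-- ===== SOURCE B (Python) =====
-- def calculate_crowding_degree(grid_indices):
--     """Calculate crowding degree for each solution (Eq. 12, 13).
--
--     Grid-cell grouping: identical index vectors are hashed together once, the
--     neighbour test then runs over distinct cells only and each solution reads
--     its cell's precomputed degree."""
--     if not grid_indices:
--         return []
--     M = len(grid_indices[0])
--     cnt = {}
--     for idx in grid_indices:
--         key = tuple(idx)
--         cnt[key] = cnt.get(key, 0) + 1
--     degree = {}
--     for c in cnt:
--         total = 0
--         for c2, m in cnt.items():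
--             if max(abs(c[k] - c2[k]) for k in range(M)) == 1:
--                 total += m
--         degree[c] = total
--     return [degree[tuple(idx)] for idx in grid_indices]
-- ===== Notes on version B (the rewrite author's own statement) =====
-- stated objective: alternative
-- what changed: B hashes identical index vectors into a counter dict and runs the Chebyshev-neighbour scan once per pair of DISTINCT grid cells, weighting by multiplicity, instead of A's full n-by-n double loop over solutions; each solution then just reads its cell's precomputed degree. Pre_ excludes the inputs where the empty max() or idx[k] raises; on the cited degenerate single-empty-row input A's i==j skip never reaches the raising max(), while B's per-cell scan does evaluate it and raises.
-- outside the precondition, e.g. on calculate_crowding_degree([[]]): A returns [0], B raises ValueError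
import Mathlib
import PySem

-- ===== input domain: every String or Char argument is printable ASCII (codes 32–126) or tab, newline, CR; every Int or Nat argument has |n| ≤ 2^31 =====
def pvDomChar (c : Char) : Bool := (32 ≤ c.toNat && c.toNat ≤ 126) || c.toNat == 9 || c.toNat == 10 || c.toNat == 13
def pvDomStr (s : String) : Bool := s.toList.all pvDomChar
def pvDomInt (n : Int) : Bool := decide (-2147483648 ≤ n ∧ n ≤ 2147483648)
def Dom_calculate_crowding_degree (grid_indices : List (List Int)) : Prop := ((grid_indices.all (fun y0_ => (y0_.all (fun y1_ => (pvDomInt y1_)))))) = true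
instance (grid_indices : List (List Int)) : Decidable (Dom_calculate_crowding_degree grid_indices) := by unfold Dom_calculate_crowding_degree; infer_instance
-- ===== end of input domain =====

-- B groups identical index vectors via a counter dict and scans distinct grid cells once,
-- weighting neighbours by multiplicity, instead of A's full n×n double loop (alternative algorithm, same results).


-- ===== PORT A =====
-- max(abs(a[k] - b[k]) for k in range(M)) — the initial accumulator 0 is exact whenever
-- Python's max does not raise (M ≥ 1, inside Pre_), since every entry is an absolute value ≥ 0.
def pvCheb (a b : List Int) (M : Int) : Int :=
  ((PySem.List.pyRange 0 M 1).map
    (fun k => |PySem.List.pyGetD a k 0 - PySem.List.pyGetD b k 0|)).foldl max 0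

def calculate_crowding_degree (grid_indices : List (List Int)) : List Int :=
  let M : Int := match grid_indices with | [] => 0 | h :: _ => (h.length : Int)
  (PySem.List.enumerate grid_indices).foldl (fun crowding p =>
    crowding ++ [(PySem.List.enumerate grid_indices).foldl (fun nc q =>
      if p.1 = q.1 then nc
      else if pvCheb p.2 q.2 M = 1 then nc + 1 else nc) 0]) []

-- ===== PORT B =====
def calculate_crowding_degree_alt (grid_indices : List (List Int)) : List Int :=
  match grid_indices with
  | [] => []
  | h :: _ =>
    let M : Int := (h.length : Int)
    let cnt : PySem.Dict (List Int) Int :=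
      grid_indices.foldl (fun d idx => d.insert idx (d.getD idx 0 + 1)) PySem.Dict.empty
    let degree : PySem.Dict (List Int) Int :=
      cnt.keys.foldl (fun d c =>
        d.insert c (cnt.items.foldl (fun tot q =>
          if pvCheb c q.1 M = 1 then tot + q.2 else tot) 0)) PySem.Dict.empty
    -- degree[tuple(idx)]: the key is always present (every row was inserted into cnt)
    grid_indices.map (fun idx => degree.getD idx 0)

-- ===== PRECONDITION & SPEC =====
-- Pre_ excludes the inputs where an empty max() or an out-of-range idx[k] is reached: a non-empty
-- list whose first row is empty or containing a row shorter than the first; A raises there on every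
-- such input except the degenerate single-empty-row list, where its i == j skip never reaches the
-- max() and it returns a singleton zero while B's per-cell scan evaluates it and raises (cited).
def Pre_calculate_crowding_degree (grid_indices : List (List Int)) : Prop :=
  grid_indices = [] ∨
    (1 ≤ (grid_indices.headD []).length ∧
     ∀ r ∈ grid_indices, (grid_indices.headD []).length ≤ r.length)
instance (grid_indices : List (List Int)) : Decidable (Pre_calculate_crowding_degree grid_indices) := by
  unfold Pre_calculate_crowding_degree; infer_instance

def pvWitness_calculate_crowding_degree : List (List Int) := [[0, 0], [1, 1], [5, 5], [1, 1]]

def Spec_calculate_crowding_degree (grid_indices : List (List Int)) (out : List Int) : Prop := out = calculate_crowding_degree_alt grid_indices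
instance (grid_indices : List (List Int)) (out : List Int) : Decidable (Spec_calculate_crowding_degree grid_indices out) := by unfold Spec_calculate_crowding_degree; infer_instance

-- ===== CLAIM (what is proved, stated in full; the proofs are below) =====
def Claim_equal_calculate_crowding_degree : Prop := ∀ (grid_indices : List (List Int)), Dom_calculate_crowding_degree grid_indices → Pre_calculate_crowding_degree grid_indices → Spec_calculate_crowding_degree grid_indices (calculate_crowding_degree grid_indices)

-- ===== LEMMAS AND PROOFS =====

-- B's inner dict expressions, named for the proofs (definitionally what the port computes on h :: t)
def pvCnt (g : List (List Int)) : PySem.Dict (List Int) Int :=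
  g.foldl (fun d idx => d.insert idx (d.getD idx 0 + 1)) PySem.Dict.empty

def pvDegreeDict (g : List (List Int)) (M : Int) : PySem.Dict (List Int) Int :=
  (pvCnt g).keys.foldl (fun d c =>
    d.insert c ((pvCnt g).items.foldl (fun tot q =>
      if pvCheb c q.1 M = 1 then tot + q.2 else tot) 0)) PySem.Dict.empty

lemma pvAlt_cons (h : List Int) (t : List (List Int)) :
    calculate_crowding_degree_alt (h :: t)
      = (h :: t).map (fun idx => (pvDegreeDict (h :: t) (h.length : Int)).getD idx 0) := rfl

-- the Chebyshev distance of a row to itself is 0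
lemma pvCheb_self (a : List Int) (M : Int) : pvCheb a a M = 0 := by
  unfold pvCheb
  have h : ∀ (l : List Int) , (l.map (fun _ => (0:Int))).foldl max 0 = 0 := by
    intro l; induction l with
    | nil => rfl
    | cons x t ih => simpa using ih
  simpa using h (PySem.List.pyRange 0 M 1)

-- A's inner loop over enumerate with the i == j skip is the plain 0/1 sum over all rows
lemma pvInnerA (g : List (List Int)) (i : Nat) (hi : i < g.length) (M : Int) :
    (PySem.List.enumerate g).foldl (fun nc q =>
        if (i : Int) = q.1 then nc
        else if pvCheb g[i] q.2 M = 1 then nc + 1 else nc) (0 : Int)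
      = (g.map (fun c => if pvCheb g[i] c M = 1 then (1:Int) else 0)).sum := by
  have hcongr : (PySem.List.enumerate g).foldl (fun nc q =>
        if (i : Int) = q.1 then nc
        else if pvCheb g[i] q.2 M = 1 then nc + 1 else nc) (0 : Int)
      = (PySem.List.enumerate g).foldl (fun nc q =>
        if pvCheb g[i] q.2 M = 1 then nc + 1 else nc) (0 : Int) := by
    apply PySem.List.foldl_congr_mem
    intro acc q hq
    rcases (PySem.List.mem_enumerate_iff g 0 q).1 hq with ⟨k, hk, rfl⟩
    by_cases hik : i = k
    · subst hik
      have hc : ((i : Int) = 0 + (i : Int)) := by omega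
      rw [if_pos hc, pvCheb_self]
      norm_num
    · have hc : ¬((i : Int) = 0 + (k : Int)) := by omega
      rw [if_neg hc]
  refine hcongr.trans ?_
  have hsnd : ((PySem.List.enumerate g).map (fun q : Int × List Int => q.2)).foldl
      (fun (nc : Int) c => if pvCheb g[i] c M = 1 then nc + 1 else nc) (0 : Int)
      = (PySem.List.enumerate g).foldl
        (fun (nc : Int) q => if pvCheb g[i] q.2 M = 1 then nc + 1 else nc) (0 : Int) := by
    rw [List.foldl_map]
  rw [PySem.List.map_snd_enumerate] at hsnd
  rw [← hsnd]
  have hstep : g.foldl (fun nc c => if pvCheb g[i] c M = 1 then nc + 1 else nc) (0 : Int)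
      = g.foldl (fun nc c => nc + (if pvCheb g[i] c M = 1 then (1:Int) else 0)) (0 : Int) := by
    apply PySem.List.foldl_congr_mem
    intro acc c _; split_ifs <;> simp
  rw [hstep, PySem.List.foldl_add]
  simp

-- a 0/1 sum weighted by multiplicities over a duplicate-free covering list is the plain 0/1 sum
lemma pvSumWeighted (p : List Int → Bool) (g : List (List Int)) :
    ∀ (l : List (List Int)), l.Nodup → (∀ x ∈ g, x ∈ l) →
      (l.map (fun c => if p c then (g.count c : Int) else 0)).sum
        = (g.map (fun c => if p c then (1:Int) else 0)).sum := by
  induction g with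
  | nil =>
    intro l _ _
    simp
  | cons x g' ih =>
    intro l hnd hcov
    have hx : x ∈ l := hcov x (by simp)
    have hone : ∀ (l' : List (List Int)), l'.Nodup → x ∈ l' →
        (l'.map (fun c => if p c then (if c = x then (1:Int) else 0) else 0)).sum
          = (if p x then (1:Int) else 0) := by
      intro l'
      induction l' with
      | nil => intro _ h; simp at h
      | cons y t iht =>
        intro hnd' hmem
        rcases List.mem_cons.1 hmem with rfl | hmem'
        · have hxt : x ∉ t := (List.nodup_cons.1 hnd').1
          have hz : (t.map (fun c => if p c then (if c = x then (1:Int) else 0) else 0)).sum = 0 := by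
            have hall : ∀ c ∈ t, (if p c then (if c = x then (1:Int) else 0) else 0) = 0 := by
              intro c hc
              have hcx : c ≠ x := by rintro rfl; exact hxt hc
              simp [hcx]
            calc (t.map (fun c => if p c then (if c = x then (1:Int) else 0) else 0)).sum
                = (t.map (fun _ => (0:Int))).sum := by
                  congr 1; exact List.map_congr_left hall
              _ = 0 := by simp
          simp [hz]
        · have hyx : y ≠ x := by
            rintro rfl; exact (List.nodup_cons.1 hnd').1 hmem'
          have := iht (List.nodup_cons.1 hnd').2 hmem'
          simp [hyx, this]
    have hcount : ∀ c : List Int, ((x :: g').count c : Int)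
        = (g'.count c : Int) + (if c = x then (1:Int) else 0) := by
      intro c
      rw [List.count_cons]
      rcases eq_or_ne c x with rfl | h
      · push_cast; simp
      · push_cast; simp [h, Ne.symm h]
    calc (l.map (fun c => if p c then ((x :: g').count c : Int) else 0)).sum
        = (l.map (fun c =>
            (if p c then (g'.count c : Int) else 0)
            + (if p c then (if c = x then (1:Int) else 0) else 0))).sum := by
          congr 1
          apply List.map_congr_left
          intro c _
          rw [hcount c]
          split_ifs <;> simp
      _ = (l.map (fun c => if p c then (g'.count c : Int) else 0)).sum
          + (l.map (fun c => if p c then (if c = x then (1:Int) else 0) else 0)).sum := by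
          exact PySem.List.sum_map_add_int l _ _
      _ = (g'.map (fun c => if p c then (1:Int) else 0)).sum + (if p x then (1:Int) else 0) := by
          rw [ih l hnd (fun z hz => hcov z (by simp [hz])), hone l hnd hx]
      _ = ((x :: g').map (fun c => if p c then (1:Int) else 0)).sum := by
          simp; ring

-- B's degree lookup for a row r ∈ g is the weighted 0/1 sum over the distinct cells
lemma pvDegreeB (g : List (List Int)) (r : List Int) (hr : r ∈ g) (M : Int) :
    (pvDegreeDict g M).getD r 0
      = ((PySem.Set.ofList g).map
          (fun c => if pvCheb r c M = 1 then (g.count c : Int) else 0)).sum := by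
  have hcnt : pvCnt g = PySem.Dict.counter g :=
    PySem.Dict.foldl_insert_getD_add_one_eq_counter g
  have hT : ∀ c : List Int,
      (pvCnt g).items.foldl (fun tot q => if pvCheb c q.1 M = 1 then tot + q.2 else tot) 0
        = ((PySem.Set.ofList g).map
            (fun k => if pvCheb c k M = 1 then (g.count k : Int) else 0)).sum := by
    intro c
    rw [hcnt, PySem.Dict.items_counter, List.foldl_map]
    have hstep : (PySem.Set.ofList g : List (List Int)).foldl
        (fun tot k => if pvCheb c k M = 1 then tot + (g.count k : Int) else tot) 0
        = (PySem.Set.ofList g : List (List Int)).foldl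
          (fun tot k => tot + (if pvCheb c k M = 1 then (g.count k : Int) else 0)) 0 := by
      apply PySem.List.foldl_congr_mem
      intro acc k _; split_ifs <;> simp
    rw [hstep, PySem.List.foldl_add]
    simp
  set T : List Int → Int := fun c =>
    (pvCnt g).items.foldl (fun tot q => if pvCheb c q.1 M = 1 then tot + q.2 else tot) 0 with hTdef
  have hkeys : (pvCnt g).keys = PySem.Set.ofList g := by
    rw [hcnt, PySem.Dict.keys_counter]
  have hndK : (PySem.Set.ofList g : List (List Int)).Nodup := PySem.Set.nodup_ofList g
  have hDD : pvDegreeDict g M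
      = (PySem.Set.ofList g : List (List Int)).foldl
          (fun d c => d.insert c (T c)) PySem.Dict.empty := by
    unfold pvDegreeDict
    rw [hkeys]
  have hitems : ((PySem.Set.ofList g : List (List Int)).foldl
      (fun d c => d.insert c (T c)) (PySem.Dict.empty : PySem.Dict (List Int) Int)).items
      = (PySem.Set.ofList g : List (List Int)).map (fun c => (c, T c)) := by
    have := PySem.Dict.items_foldl_insert_fresh
      (l := (PySem.Set.ofList g : List (List Int))) (k := fun c => c) (v := T)
      (d := (PySem.Dict.empty : PySem.Dict (List Int) Int))
      (by intro a _; simp) (by simp)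
    simpa using this
  have hrmem : r ∈ (PySem.Set.ofList g : List (List Int)) := (PySem.Set.mem_ofList g r).2 hr
  have hget : (pvDegreeDict g M).getD r 0 = T r := by
    rw [hDD]
    apply PySem.Dict.getD_of_mem_items
    · rw [hitems]
      exact List.mem_map.2 ⟨r, hrmem, rfl⟩
    · exact PySem.Dict.nodup_keys_foldl_insert _ _ _ (by simp)
  rw [hget, hTdef]
  exact hT r

-- ===== VERDICT (by name: the statement is the Claim_ definition above) =====
theorem calculate_crowding_degree_spec : Claim_equal_calculate_crowding_degree := by
  intro g _ _
  unfold Spec_calculate_crowding_degree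
  cases g with
  | nil => rfl
  | cons h t =>
    rw [pvAlt_cons]
    show (PySem.List.enumerate (h :: t)).foldl (fun crowding p =>
        crowding ++ [(PySem.List.enumerate (h :: t)).foldl (fun nc q =>
          if p.1 = q.1 then nc
          else if pvCheb p.2 q.2 ((h.length : Nat) : Int) = 1 then nc + 1 else nc) 0]) []
      = (h :: t).map (fun idx => (pvDegreeDict (h :: t) (h.length : Int)).getD idx 0)
    rw [PySem.List.foldl_append_singleton_eq_map, List.nil_append]
    apply List.ext_getElem
    · simp [PySem.List.length_enumerate]
    · intro i hi1 hi2
      rw [List.getElem_map, List.getElem_map, PySem.List.getElem_enumerate]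
      have hi : i < (h :: t).length := by
        simpa [PySem.List.length_enumerate] using hi1
      simp only [zero_add]
      rw [pvInnerA (h :: t) i hi ((h.length : Int)),
          pvDegreeB (h :: t) ((h :: t)[i]) (List.getElem_mem hi) ((h.length : Int))]
      have hsum := pvSumWeighted (fun c => decide (pvCheb (h :: t)[i] c (h.length : Int) = 1))
        (h :: t) (PySem.Set.ofList (h :: t)) (PySem.Set.nodup_ofList _)
        (fun x hx => (PySem.Set.mem_ofList _ x).2 hx)
      simp only [decide_eq_true_eq] at hsum
      exact hsum.symm
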